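-- pv_equiv track=rewrite | github.com/Halukisan/HTML_to_Markdown_Content_Extractor | deploy_docker_local/app/zprogress.py | is_media_url
-- ===== SOURCE A (Python) =====
-- def is_media_url(url: str) -> bool:
--     """
--     判断URL是否为媒体文件URL
--     """
--     if not url:
--         return False
--
--     # 视频文件扩展名
--     video_extensions = ['.mp4', '.avi', '.mov', '.wmv', '.flv', '.webm', '.mkv', '.m4v']
--     # 音频文件扩展名
--     audio_extensions = ['.mp3', '.wav', '.flac', '.aac', '.ogg', '.wma', '.m4a']
--     # 文件扩展名
--     file_extensions = ['.pdf', '.doc', '.docx', '.xls', '.xlsx', '.ppt', '.pptx',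
--                      '.zip', '.rar', '.tar', '.gz', '.7z', '.txt', '.rtf']
--     # 图片扩展名
--     pic_extensions = ['.jpg','.png','.jpeg','.webp','.svg']
--
--     url_lower = url.lower()
--
--     # 检查文件扩展名
--     for ext in video_extensions + audio_extensions + file_extensions + pic_extensions:
--         if url_lower.endswith(ext):
--             return True
--
--     # 检查URL中是否包含媒体相关的关键词
--     media_keywords = ['video', 'audio', 'player', 'stream', 'media', 'download', 'file']
--     for keyword in media_keywords:
--         if keyword in url_lower:
--             return True
--
--     return False
-- ===== SOURCE B (Python) =====
-- MEDIA_EXTENSIONS = frozenset([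
--     '.mp4', '.avi', '.mov', '.wmv', '.flv', '.webm', '.mkv', '.m4v',
--     '.mp3', '.wav', '.flac', '.aac', '.ogg', '.wma', '.m4a',
--     '.pdf', '.doc', '.docx', '.xls', '.xlsx', '.ppt', '.pptx',
--     '.zip', '.rar', '.tar', '.gz', '.7z', '.txt', '.rtf',
--     '.jpg', '.png', '.jpeg', '.webp', '.svg',
-- ])
--
-- MEDIA_KEYWORDS = ('video', 'audio', 'player', 'stream', 'media', 'download', 'file')
--
--
-- def is_media_url(url: str) -> bool:
--     url_lower = url.lower()
--     idx = url_lower.rfind('.')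
--     ext = url_lower[idx:] if idx != -1 else ''
--     return ext in MEDIA_EXTENSIONS or any(k in url_lower for k in MEDIA_KEYWORDS)
-- ===== Notes on version B (the rewrite author's own statement) =====
-- stated objective: simpler
-- what changed: B computes the lowercased URL's suffix after the last dot once (rfind + slice) and tests it with a single membership in one precomputed frozenset, replacing A's endswith scan over four concatenated extension lists; the keyword loop becomes an any() over a tuple.
import Mathlib
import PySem

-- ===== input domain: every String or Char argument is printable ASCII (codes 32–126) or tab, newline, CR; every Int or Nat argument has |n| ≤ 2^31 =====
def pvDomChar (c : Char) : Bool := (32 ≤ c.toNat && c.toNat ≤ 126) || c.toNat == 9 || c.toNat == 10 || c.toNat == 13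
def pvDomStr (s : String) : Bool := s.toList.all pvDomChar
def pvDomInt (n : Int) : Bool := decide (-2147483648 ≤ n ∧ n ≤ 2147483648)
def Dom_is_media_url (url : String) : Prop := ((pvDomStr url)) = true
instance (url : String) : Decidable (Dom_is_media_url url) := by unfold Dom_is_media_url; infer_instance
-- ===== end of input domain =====

-- B replaces A's per-extension endswith loop by computing the suffix after the
-- last dot once and testing membership in one precomputed set (simpler).

-- ===== PORT A =====
def pvVideoExts : List (List Char) :=
  [".mp4".toList, ".avi".toList, ".mov".toList, ".wmv".toList, ".flv".toList,
   ".webm".toList, ".mkv".toList, ".m4v".toList]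
def pvAudioExts : List (List Char) :=
  [".mp3".toList, ".wav".toList, ".flac".toList, ".aac".toList, ".ogg".toList,
   ".wma".toList, ".m4a".toList]
def pvFileExts : List (List Char) :=
  [".pdf".toList, ".doc".toList, ".docx".toList, ".xls".toList, ".xlsx".toList,
   ".ppt".toList, ".pptx".toList, ".zip".toList, ".rar".toList, ".tar".toList,
   ".gz".toList, ".7z".toList, ".txt".toList, ".rtf".toList]
def pvPicExts : List (List Char) :=
  [".jpg".toList, ".png".toList, ".jpeg".toList, ".webp".toList, ".svg".toList]
def pvMediaKeywords : List (List Char) :=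
  ["video".toList, "audio".toList, "player".toList, "stream".toList,
   "media".toList, "download".toList, "file".toList]

-- A's first for-loop: return True on the first extension url_lower ends with
def pvCheckExts : List (List Char) → List Char → Bool
  | [], _ => false
  | e :: rest, ul => if PySem.Chars.endswith ul e then true else pvCheckExts rest ul

-- A's second for-loop: return True on the first keyword contained in url_lower
def pvCheckKeywords : List (List Char) → List Char → Bool
  | [], _ => false
  | k :: rest, ul => if PySem.Chars.isIn k ul then true else pvCheckKeywords rest ul

def is_media_url (url : String) : Bool :=
  if url.toList = [] then false
  else
    let ul := PySem.Chars.lower url.toList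
    if pvCheckExts (pvVideoExts ++ pvAudioExts ++ pvFileExts ++ pvPicExts) ul then true
    else if pvCheckKeywords pvMediaKeywords ul then true
    else false

-- ===== PORT B =====
-- the frozenset MEDIA_EXTENSIONS from Source B (distinct elements, literal order)
def pvMediaExtSet : PySem.Set (List Char) :=
  PySem.Set.ofList
    [".mp4".toList, ".avi".toList, ".mov".toList, ".wmv".toList, ".flv".toList,
     ".webm".toList, ".mkv".toList, ".m4v".toList,
     ".mp3".toList, ".wav".toList, ".flac".toList, ".aac".toList, ".ogg".toList,
     ".wma".toList, ".m4a".toList,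
     ".pdf".toList, ".doc".toList, ".docx".toList, ".xls".toList, ".xlsx".toList,
     ".ppt".toList, ".pptx".toList,
     ".zip".toList, ".rar".toList, ".tar".toList, ".gz".toList, ".7z".toList,
     ".txt".toList, ".rtf".toList,
     ".jpg".toList, ".png".toList, ".jpeg".toList, ".webp".toList, ".svg".toList]

-- (B reuses the keyword list constant pvMediaKeywords above)
def is_media_url_alt (url : String) : Bool :=
  let ul := PySem.Chars.lower url.toList
  let idx := PySem.Chars.rfind ul ['.']
  let ext := if idx ≠ -1 then PySem.List.slice ul (some idx) none else []
  PySem.Set.contains pvMediaExtSet ext || pvMediaKeywords.any (fun k => PySem.Chars.isIn k ul)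

-- ===== PRECONDITION & SPEC =====
def Spec_is_media_url (url : String) (out : Bool) : Prop := out = is_media_url_alt url
instance (url : String) (out : Bool) : Decidable (Spec_is_media_url url out) := by unfold Spec_is_media_url; infer_instance

-- ===== CLAIM (what is proved, stated in full; the proofs are below) =====
def Claim_equal_is_media_url : Prop := ∀ (url : String), Dom_is_media_url url → Spec_is_media_url url (is_media_url url)

-- ===== LEMMAS AND PROOFS =====

-- rfind.go never returns below -1
lemma pv_go_ge (s sub : List Char) (j : Nat) : (-1 : Int) ≤ PySem.Chars.rfind.go s sub j := by
  induction j with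
  | zero => simp only [PySem.Chars.rfind.go]; split <;> norm_num
  | succ j ih =>
    simp only [PySem.Chars.rfind.go]
    split
    · omega
    · exact ih

-- rfind.go s sub j = k when sub matches at k ≤ j and at no later index ≤ j
lemma pv_rfind_go_eq (s sub : List Char) (j k : Nat) (hk : k ≤ j)
    (hpre : sub.isPrefixOf (s.drop k) = true)
    (hmax : ∀ i, k < i → i ≤ j → sub.isPrefixOf (s.drop i) = false) :
    PySem.Chars.rfind.go s sub j = (k : Int) := by
  induction j with
  | zero =>
    interval_cases k
    rw [List.drop_zero] at hpre
    simp [PySem.Chars.rfind.go, hpre]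
  | succ j ih =>
    by_cases h : sub.isPrefixOf (s.drop (j + 1)) = true
    · have : k = j + 1 := by
        by_contra hne
        have hklt : k < j + 1 := lt_of_le_of_ne hk hne
        have := hmax (j + 1) hklt le_rfl
        simp [this] at h
      subst this
      simp [PySem.Chars.rfind.go, h]
    · have hk' : k ≤ j := by
        rcases Nat.lt_or_ge k (j + 1) with h1 | h1
        · omega
        · exfalso; have : k = j + 1 := by omega
          subst this; exact h hpre
      have := ih hk' (fun i hi hij => hmax i hi (by omega))
      simp only [PySem.Chars.rfind.go]
      split
      · exact absurd (by assumption) (by simp [h])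
      · exact this

-- B's "suffix after the last dot" computation (the let-block of is_media_url_alt)
def pvExtB (ul : List Char) : List Char :=
  let idx := PySem.Chars.rfind ul ['.']
  if idx ≠ -1 then PySem.List.slice ul (some idx) none else []

lemma pvExtB_suffix (ul : List Char) : pvExtB ul <:+ ul := by
  unfold pvExtB
  by_cases hidx : PySem.Chars.rfind ul ['.'] = -1
  · simp [hidx]
  · have hnn : 0 ≤ PySem.Chars.rfind ul ['.'] := by
      have := pv_go_ge ul ['.'] ul.length
      unfold PySem.Chars.rfind at *
      omega
    simp only [hidx, ne_eq, not_false_iff, if_pos]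
    rw [PySem.List.slice_from ul hnn]
    exact List.drop_suffix _ _

-- shape of every extension: a '.' followed by a dot-free tail
lemma pv_ext_shape :
    (pvVideoExts ++ pvAudioExts ++ pvFileExts ++ pvPicExts).all
      (fun e => (e.head? == some '.') && !(e.drop 1).contains '.') = true := by decide

-- B's frozenset holds exactly the elements of A's concatenated list (same order)
lemma pv_set_eq_list :
    pvMediaExtSet = (pvVideoExts ++ pvAudioExts ++ pvFileExts ++ pvPicExts : List (List Char)) := by
  decide

-- A's extension loop is an existential over suffixes
lemma pv_checkExts_iff (L : List (List Char)) (ul : List Char) :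
    pvCheckExts L ul = true ↔ ∃ e ∈ L, e <:+ ul := by
  induction L with
  | nil => simp [pvCheckExts]
  | cons e rest ih =>
    simp only [pvCheckExts]
    by_cases h : PySem.Chars.endswith ul e = true
    · simp [h, (PySem.Chars.endswith_iff ul e).mp h]
    · have h' : ¬ e <:+ ul := fun hs => h ((PySem.Chars.endswith_iff ul e).mpr hs)
      simp [h, ih, h']

-- A's keyword loop is List.any
lemma pv_checkKeywords_eq (L : List (List Char)) (ul : List Char) :
    pvCheckKeywords L ul = L.any (fun k => PySem.Chars.isIn k ul) := by
  induction L with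
  | nil => simp [pvCheckKeywords]
  | cons k rest ih =>
    by_cases h : PySem.Chars.isIn k ul = true <;> simp [pvCheckKeywords, h, ih]

-- the central lemma: B's single membership test = A's endswith scan
lemma pv_extB_mem_iff (ul : List Char) :
    pvExtB ul ∈ (pvVideoExts ++ pvAudioExts ++ pvFileExts ++ pvPicExts) ↔
      ∃ e ∈ (pvVideoExts ++ pvAudioExts ++ pvFileExts ++ pvPicExts), e <:+ ul := by
  constructor
  · intro h
    exact ⟨pvExtB ul, h, pvExtB_suffix ul⟩
  · rintro ⟨e, heL, pre, hpre⟩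
    have hshape := pv_ext_shape
    rw [List.all_eq_true] at hshape
    have he := hshape e heL
    obtain ⟨t, rfl, hdot⟩ : ∃ t, e = '.' :: t ∧ '.' ∉ t := by
      cases e with
      | nil => simp at he
      | cons c t =>
        simp only [List.head?_cons, List.drop_one, List.tail_cons, Bool.and_eq_true,
          beq_iff_eq, Option.some.injEq, Bool.not_eq_true'] at he
        obtain ⟨rfl, hc⟩ := he
        exact ⟨t, rfl, by simpa using hc⟩
    have hfind : PySem.Chars.rfind ul ['.'] = (pre.length : Int) := by
      unfold PySem.Chars.rfind
      apply pv_rfind_go_eq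
      · have : pre.length ≤ ul.length := by rw [← hpre]; simp
        exact this
      · rw [← hpre, List.drop_left]
        simp
      · intro i hlt hle
        rw [← hpre]
        have hdrop : (pre ++ '.' :: t).drop i = t.drop (i - pre.length - 1) := by
          rw [List.drop_append]
          have h1 : pre.drop i = [] := List.drop_eq_nil_of_le (by omega)
          have h2 : i - pre.length = (i - pre.length - 1) + 1 := by omega
          rw [h1, h2]
          simp
        rw [hdrop]
        by_contra hne
        have hp : (['.'] : List Char) <+: t.drop (i - pre.length - 1) := by
          rw [← List.isPrefixOf_iff_prefix]
          simpa using hne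
        have : '.' ∈ t.drop (i - pre.length - 1) := hp.mem (by simp)
        exact hdot ((List.drop_sublist _ _).mem this)
    unfold pvExtB
    rw [hfind]
    have hne : (pre.length : Int) ≠ -1 := by omega
    simp only [ne_eq, hne, not_false_iff, if_pos]
    rw [PySem.List.slice_from ul (by positivity)]
    simp only [Int.toNat_natCast, ← hpre, List.drop_left]
    exact heL

-- ===== VERDICT (by name: the statement is the Claim_ definition above) =====
theorem is_media_url_spec : Claim_equal_is_media_url := by
  intro url _
  unfold Spec_is_media_url is_media_url is_media_url_alt
  by_cases hnil : url.toList = []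
  · simp only [hnil, if_pos]
    decide
  · simp only [hnil, if_neg, not_false_iff]
    set ul := PySem.Chars.lower url.toList with hul
    have hext : pvCheckExts (pvVideoExts ++ pvAudioExts ++ pvFileExts ++ pvPicExts) ul =
        PySem.Set.contains pvMediaExtSet (pvExtB ul) := by
      by_cases h : pvCheckExts (pvVideoExts ++ pvAudioExts ++ pvFileExts ++ pvPicExts) ul = true
      · rw [h]
        symm
        rw [PySem.Set.contains_iff, pv_set_eq_list, pv_extB_mem_iff]
        exact (pv_checkExts_iff _ ul).mp h
      · rw [Bool.not_eq_true] at h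
        rw [h]
        symm
        rw [Bool.eq_false_iff]
        intro hc
        have hmem := (pv_extB_mem_iff ul).mp (by
          rw [← pv_set_eq_list]
          exact (PySem.Set.contains_iff _ _).mp hc)
        have := (pv_checkExts_iff _ ul).mpr hmem
        rw [h] at this
        exact Bool.false_ne_true this
    rw [pv_checkKeywords_eq]
    unfold pvExtB at hext
    simp only [← hext]
    by_cases h1 : pvCheckExts (pvVideoExts ++ pvAudioExts ++ pvFileExts ++ pvPicExts) ul = true <;>
      simp [pvMediaKeywords]
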